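-- pv_equiv track=rewrite | github.com/CytrexSGR/news-microservices | services/narrative-service/app/services/narrative_clustering.py | cluster_frames
-- ===== SOURCE A (Python) =====
-- from typing import List, Dict, Any
-- from collections import Counter, defaultdict
--
-- def cluster_frames(frames: List[Dict[str, Any]]) -> Dict[int, List[Dict[str, Any]]]:
--     """
--     Cluster frames by type and entity overlap
--
--     Returns:
--         Dictionary mapping cluster_id to list of frames
--     """
--     if not frames:
--         return {}
--
--     # Group by frame type first
--     type_groups = defaultdict(list)
--     for frame in frames:
--         type_groups[frame["frame_type"]].append(frame)
--
--     # Create clusters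
--     clusters = {}
--     cluster_id = 0
--
--     for frame_type, type_frames in type_groups.items():
--         # For each frame type, cluster by entity overlap
--         if len(type_frames) >= 3:  # Need at least 3 frames to form cluster
--             clusters[cluster_id] = type_frames
--             cluster_id += 1
--
--     return clusters
-- ===== SOURCE B (Python) =====
-- from collections import Counter
--
-- def cluster_frames(frames):
--     types = [f["frame_type"] for f in frames]
--     counts = Counter(types)
--     qualifying = list(dict.fromkeys(t for t in types if counts[t] >= 3))
--     return {i: [f for f in frames if f["frame_type"] == t]
--             for i, t in enumerate(qualifying)}
-- ===== Notes on version B (the rewrite author's own statement) =====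
-- stated objective: alternative
-- what changed: A materializes a dict of all per-type groups and then filters/enumerates it; B first counts frame types, derives the first-appearance-ordered list of qualifying types, and builds each cluster by filtering the input once per qualifying type.
import Mathlib
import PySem

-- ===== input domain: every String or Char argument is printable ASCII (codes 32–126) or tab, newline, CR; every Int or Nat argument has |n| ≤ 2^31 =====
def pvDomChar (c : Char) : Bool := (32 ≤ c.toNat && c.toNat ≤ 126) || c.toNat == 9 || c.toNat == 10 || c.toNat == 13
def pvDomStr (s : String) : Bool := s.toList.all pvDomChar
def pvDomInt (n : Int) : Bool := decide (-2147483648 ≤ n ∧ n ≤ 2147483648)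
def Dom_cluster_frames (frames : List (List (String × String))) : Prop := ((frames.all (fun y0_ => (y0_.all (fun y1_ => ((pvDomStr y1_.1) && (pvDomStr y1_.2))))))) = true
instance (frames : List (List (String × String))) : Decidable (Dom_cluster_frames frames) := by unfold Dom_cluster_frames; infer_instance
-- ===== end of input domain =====

-- B replaces A's "materialize a dict of all per-type groups, then filter/enumerate it" by
-- "count types, pick the first-appearance-ordered qualifying types, build each cluster by filtering"
-- (alternative decomposition, similar cost).


-- ===== PORT A =====
-- frame["frame_type"]: first-match lookup in the frame's association list (exact on dict-shaped
-- frames); Pre_ guarantees the key is present, so the "" default is never used on admitted inputs.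
def pvFrameType (frame : List (String × String)) : String :=
  ((PySem.Dict.mk frame).get? "frame_type").getD ""

def cluster_frames (frames : List (List (String × String))) : List (Int × List (List (String × String))) :=
  if frames = [] then []
  else
    -- type_groups = defaultdict(list); for frame in frames: type_groups[frame["frame_type"]].append(frame)
    let type_groups : PySem.Dict String (List (List (String × String))) :=
      frames.foldl (fun d frame => d.modify (pvFrameType frame) [] (fun v => v ++ [frame])) PySem.Dict.empty
    -- clusters = {}; cluster_id = 0; for frame_type, type_frames in type_groups.items():
    --   if len(type_frames) >= 3: clusters[cluster_id] = type_frames; cluster_id += 1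
    let res := type_groups.items.foldl
      (fun (acc : PySem.Dict Int (List (List (String × String))) × Int) p =>
        if 3 ≤ p.2.length then (acc.1.insert acc.2 p.2, acc.2 + 1) else acc)
      (PySem.Dict.empty, 0)
    res.1.items

-- ===== PORT B =====
def cluster_frames_alt (frames : List (List (String × String))) : List (Int × List (List (String × String))) :=
  let types := frames.map pvFrameType
  let counts := PySem.Dict.counter types
  let qualifying := PySem.List.dedup (types.filter (fun t => 3 ≤ counts.getD t 0))
  (PySem.List.enumerate qualifying).map
    (fun p => (p.1, frames.filter (fun fr => pvFrameType fr == p.2)))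

-- ===== PRECONDITION & SPEC =====
-- Pre_ excludes exactly the inputs where some frame lacks the "frame_type" key, on which the
-- Python A raises KeyError (B raises there too).
def Pre_cluster_frames (frames : List (List (String × String))) : Prop :=
  ∀ fr ∈ frames, "frame_type" ∈ fr.map Prod.fst
instance (frames : List (List (String × String))) : Decidable (Pre_cluster_frames frames) := by unfold Pre_cluster_frames; infer_instance

def pvWitness_cluster_frames : (List (List (String × String))) :=
  [[("frame_type", "a")], [("frame_type", "a")], [("frame_type", "a")], [("frame_type", "b")]]

def Spec_cluster_frames (frames : List (List (String × String))) (out : List (Int × List (List (String × String)))) : Prop := out = cluster_frames_alt frames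
instance (frames : List (List (String × String))) (out : List (Int × List (List (String × String)))) : Decidable (Spec_cluster_frames frames out) := by unfold Spec_cluster_frames; infer_instance

-- ===== CLAIM (what is proved, stated in full; the proofs are below) =====
def Claim_equal_cluster_frames : Prop := ∀ (frames : List (List (String × String))), Dom_cluster_frames frames → Pre_cluster_frames frames → Spec_cluster_frames frames (cluster_frames frames)

-- ===== LEMMAS AND PROOFS =====

-- the sequential id assignment A performs over the kept groups
def pvBuildFrom (n : Int) : List (String × List (List (String × String))) → List (Int × List (List (String × String)))
  | [] => []
  | p :: rest => if 3 ≤ p.2.length then (n, p.2) :: pvBuildFrom (n + 1) rest else pvBuildFrom n rest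

theorem pv_loop_items (L : List (String × List (List (String × String))))
    (d : PySem.Dict Int (List (List (String × String)))) (n : Int)
    (hk : ∀ k ∈ d.keys, k < n) :
    (L.foldl
      (fun (acc : PySem.Dict Int (List (List (String × String))) × Int) p =>
        if 3 ≤ p.2.length then (acc.1.insert acc.2 p.2, acc.2 + 1) else acc)
      (d, n)).1.items = d.items ++ pvBuildFrom n L := by
  induction L generalizing d n with
  | nil => simp [pvBuildFrom]
  | cons p rest ih =>
    simp only [List.foldl_cons, pvBuildFrom]
    by_cases h : 3 ≤ p.2.length
    · simp only [if_pos h]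
      have hc : d.contains n = false := by
        rw [PySem.Dict.contains_eq_decide_mem_keys]
        simp only [decide_eq_false_iff_not]
        intro hm; exact absurd (hk n hm) (lt_irrefl n)
      rw [ih (d.insert n p.2) (n + 1) ?_]
      · rw [PySem.Dict.items_insert_of_not_contains (h := hc)]
        simp
      · intro k hkm
        rcases (PySem.Dict.mem_keys_insert _ _ _ _).mp hkm with h1 | h1
        · omega
        · have := hk k h1; omega
    · simp only [if_neg h]
      exact ih d n hk

theorem pv_groups_items (frames : List (List (String × String))) :
    (frames.foldl (fun d frame => d.modify (pvFrameType frame) [] (fun v => v ++ [frame])) PySem.Dict.empty).items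
    = (PySem.List.dedup (frames.map pvFrameType)).map
        (fun t => (t, frames.filter (fun fr => pvFrameType fr == t))) := by
  have hnd : (frames.foldl (fun d frame => d.modify (pvFrameType frame) [] (fun v => v ++ [frame])) PySem.Dict.empty).keys.Nodup :=
    PySem.Dict.nodup_keys_foldl_modify_key frames pvFrameType [] (fun _ fr v => v ++ [fr]) PySem.Dict.empty (by simp)
  have hkeys : (frames.foldl (fun d frame => d.modify (pvFrameType frame) [] (fun v => v ++ [frame])) PySem.Dict.empty).keys
      = PySem.List.dedup (frames.map pvFrameType) := by
    have h := PySem.Dict.keys_foldl_modify_key frames pvFrameType [] (fun _ fr v => v ++ [fr]) PySem.Dict.empty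
    simpa [PySem.Set.update, PySem.List.dedup, PySem.Set.ofList, PySem.Set.empty] using h
  have hget : ∀ t, (frames.foldl (fun d frame => d.modify (pvFrameType frame) [] (fun v => v ++ [frame])) PySem.Dict.empty).getD t []
      = frames.filter (fun fr => pvFrameType fr == t) := by
    intro t
    have hm : frames.foldl (fun d frame => d.modify (pvFrameType frame) [] (fun v => v ++ [frame])) PySem.Dict.empty
        = (frames.map (fun fr => (pvFrameType fr, fr))).foldl (fun d p => d.modify p.1 [] (fun v => v ++ [p.2])) PySem.Dict.empty := by
      rw [List.foldl_map]
    rw [hm, PySem.Dict.getD_foldl_modify_append]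
    simp [List.filter_map, Function.comp_def, List.map_map]
  rw [PySem.Dict.items_eq_map_keys _ hnd [], hkeys]
  exact List.map_congr_left (fun t _ => by rw [hget t])

theorem pv_filter_ofList {α : Type} [BEq α] [LawfulBEq α] (p : α → Bool) (l s : List α) :
    List.foldl PySem.Set.add (s.filter p) (l.filter p) = (List.foldl PySem.Set.add s l).filter p := by
  induction l generalizing s with
  | nil => simp
  | cons x t ih =>
    by_cases hx : p x = true
    · have hstep : PySem.Set.add (s.filter p) x = (PySem.Set.add s x).filter p := by
        by_cases hm : x ∈ s
        · simp [PySem.Set.add, List.mem_filter, hm, hx]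
        · simp [PySem.Set.add, List.mem_filter, hm, hx, List.filter_append]
      calc List.foldl PySem.Set.add (s.filter p) ((x :: t).filter p)
          = List.foldl PySem.Set.add (PySem.Set.add (s.filter p) x) (t.filter p) := by
            simp [hx]
        _ = List.foldl PySem.Set.add ((PySem.Set.add s x).filter p) (t.filter p) := by rw [hstep]
        _ = (List.foldl PySem.Set.add (PySem.Set.add s x) t).filter p := ih _
        _ = (List.foldl PySem.Set.add s (x :: t)).filter p := by simp
    · have hstep : (PySem.Set.add s x).filter p = s.filter p := by
        by_cases hm : x ∈ s
        · simp [PySem.Set.add, hm]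
        · simp [PySem.Set.add, hm, List.filter_append, hx]
      have h := ih (PySem.Set.add s x)
      rw [hstep] at h
      simpa [List.filter_cons, hx] using h

theorem pv_buildFrom_map (g : String → List (List (String × String))) (L : List String) (n : Int) :
    pvBuildFrom n (L.map (fun t => (t, g t)))
    = (PySem.List.enumerate (L.filter (fun t => 3 ≤ (g t).length)) n).map (fun p => (p.1, g p.2)) := by
  induction L generalizing n with
  | nil => simp [pvBuildFrom]
  | cons x t ih =>
    by_cases h : 3 ≤ (g x).length
    · simp [pvBuildFrom, h, ih]
    · simp [pvBuildFrom, h, ih]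

theorem pv_main (frames : List (List (String × String))) :
    cluster_frames frames = cluster_frames_alt frames := by
  by_cases hf : frames = []
  · subst hf; rfl
  · unfold cluster_frames cluster_frames_alt
    simp only [if_neg hf]
    rw [pv_groups_items, pv_loop_items _ _ _ (by simp),
      pv_buildFrom_map (fun t => frames.filter (fun fr => pvFrameType fr == t))]
    have hpred : (PySem.List.dedup (frames.map pvFrameType)).filter
          (fun t => decide (3 ≤ (frames.filter (fun fr => pvFrameType fr == t)).length))
        = PySem.List.dedup ((frames.map pvFrameType).filter
          (fun t => decide (3 ≤ (PySem.Dict.counter (frames.map pvFrameType)).getD t 0))) := by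
      have hp : ∀ t : String,
          (decide (3 ≤ (frames.filter (fun fr => pvFrameType fr == t)).length))
          = (decide (3 ≤ (PySem.Dict.counter (frames.map pvFrameType)).getD t 0)) := by
        intro t
        rw [PySem.Dict.getD_counter]
        have hc : (frames.filter (fun fr => pvFrameType fr == t)).length
            = List.count t (frames.map pvFrameType) := by
          calc (frames.filter (fun fr => pvFrameType fr == t)).length
              = frames.countP (fun fr => pvFrameType fr == t) := List.countP_eq_length_filter.symm
            _ = (frames.map pvFrameType).countP (fun x => x == t) := (List.countP_map (p := fun x => x == t) (f := pvFrameType) (l := frames)).symm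
            _ = List.count t (frames.map pvFrameType) := rfl
        rw [hc]
        simp only [decide_eq_decide]
        omega
      rw [show (fun t => decide (3 ≤ (frames.filter (fun fr => pvFrameType fr == t)).length))
            = (fun t => decide (3 ≤ (PySem.Dict.counter (frames.map pvFrameType)).getD t 0)) from funext hp]
      rw [PySem.List.dedup, PySem.List.dedup, PySem.Set.ofList, PySem.Set.ofList]
      rw [← pv_filter_ofList]
      rfl
    rw [show (PySem.Dict.empty : PySem.Dict Int (List (List (String × String)))).items = [] from rfl,
      List.nil_append, hpred]

-- ===== VERDICT (by name: the statement is the Claim_ definition above) =====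
theorem cluster_frames_spec : Claim_equal_cluster_frames := by
  intro frames _ _
  exact pv_main frames
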